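-- pv_equiv track=rewrite | github.com/adcontextprotocol/salesagent | tests/unit/test_mcp_tool_test_coverage.py | _tool_has_test_coverage
-- ===== SOURCE A (Python) =====
-- def _tool_has_test_coverage(tool_name: str, test_content: str) -> bool:
--     """Check if a tool has test coverage based on test file content.
--
--     Looks for patterns that indicate the tool is being tested:
--     - test_{tool_name} (standard test function naming)
--     - _{tool_name}_ (impl function tests)
--     - {tool_name}_raw (A2A raw function tests)
--     - "{tool_name}" in tool registration tests
--     - {tool_name}( (direct function calls in tests)
--     """
--     patterns = [
--         f"test_{tool_name}",  # test_get_products, test_list_tasks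
--         f"_{tool_name}_",  # _get_products_impl
--         f"{tool_name}_raw",  # get_products_raw
--         f'"{tool_name}"',  # "get_products" in assertions
--         f"'{tool_name}'",  # 'get_products' in assertions
--         f"{tool_name}(",  # get_products( direct calls
--     ]
--     return any(pattern in test_content for pattern in patterns)
-- ===== SOURCE B (Python) =====
-- def _tool_has_test_coverage(tool_name: str, test_content: str) -> bool:
--     """Single scan: find each occurrence of tool_name and inspect the
--     characters around it, instead of building six pattern strings and
--     running six independent substring searches."""
--     s = test_content
--     k = len(tool_name)
--     for i in range(len(s) + 1 - k):
--         if s[i:i + k] != tool_name: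
--             continue
--         before = s[:i]
--         after = s[i + k:]
--         if before.endswith("test_"):
--             return True
--         if before.endswith("_") and after.startswith("_"):
--             return True
--         if after.startswith("_raw"):
--             return True
--         if before.endswith('"') and after.startswith('"'):
--             return True
--         if before.endswith("'") and after.startswith("'"):
--             return True
--         if after.startswith("("):
--             return True
--     return False
-- ===== Notes on version B (the rewrite author's own statement) =====
-- stated objective: alternative
-- what changed: B makes a single left-to-right scan over test_content, checking at each occurrence of tool_name the O(1) surrounding context (preceding 'test_'/'_'/quote, following '_raw'/'_'/quote/'('), instead of building six derived pattern strings and running six independent substring searches.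
import Mathlib
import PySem

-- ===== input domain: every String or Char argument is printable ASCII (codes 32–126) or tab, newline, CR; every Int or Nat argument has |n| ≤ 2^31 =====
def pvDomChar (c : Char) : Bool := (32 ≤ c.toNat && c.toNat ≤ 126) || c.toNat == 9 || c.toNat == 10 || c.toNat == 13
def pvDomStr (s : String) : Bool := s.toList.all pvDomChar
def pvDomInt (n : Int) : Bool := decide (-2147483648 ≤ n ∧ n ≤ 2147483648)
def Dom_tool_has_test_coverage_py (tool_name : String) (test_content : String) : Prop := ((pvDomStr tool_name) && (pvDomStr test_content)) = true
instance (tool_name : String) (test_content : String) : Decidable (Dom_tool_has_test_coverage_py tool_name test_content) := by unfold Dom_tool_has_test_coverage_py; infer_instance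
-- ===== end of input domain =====

-- B replaces A's six independent substring searches by one scan over test_content that
-- checks the O(1) context around each occurrence of tool_name (alternative decomposition, same cost class).


-- ===== PORT A =====
-- f-string concatenation is List.append on code points; 'pattern in test_content' is PySem.Chars.isIn
def tool_has_test_coverage_py (tool_name : String) (test_content : String) : Bool :=
  let n := tool_name.toList
  let patterns : List (List Char) :=
    [ "test_".toList ++ n,
      "_".toList ++ n ++ "_".toList,
      n ++ "_raw".toList,
      "\"".toList ++ n ++ "\"".toList,
      "'".toList ++ n ++ "'".toList,
      n ++ "(".toList ]
  patterns.any (fun p => PySem.Chars.isIn p test_content.toList)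

-- ===== PORT B =====
-- body of Source B's loop at position i: the nonnegative slices s[i:i+k] / s[:i] / s[i+k:] are
-- exactly drop/take (PySem.List.slice_toNat / slice_to / slice_from); the chain of
-- 'if …: return True' statements inside one loop iteration is the boolean disjunction below
def altCheckAt (n cs : List Char) (i : Nat) : Bool :=
  if (cs.drop i).take n.length = n then
    let before := cs.take i
    let after := cs.drop (i + n.length)
    PySem.Chars.endswith before "test_".toList
    || (PySem.Chars.endswith before "_".toList && PySem.Chars.startswith after "_".toList)
    || PySem.Chars.startswith after "_raw".toList
    || (PySem.Chars.endswith before "\"".toList && PySem.Chars.startswith after "\"".toList)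
    || (PySem.Chars.endswith before "'".toList && PySem.Chars.startswith after "'".toList)
    || PySem.Chars.startswith after "(".toList
  else false

-- range(len(s) + 1 - k): Nat truncated subtraction gives the same empty range as Python when k > len(s)+1
def tool_has_test_coverage_py_alt (tool_name : String) (test_content : String) : Bool :=
  let n := tool_name.toList
  let cs := test_content.toList
  (List.range (cs.length + 1 - n.length)).any (fun i => altCheckAt n cs i)

-- ===== PRECONDITION & SPEC =====
def Spec_tool_has_test_coverage_py (tool_name : String) (test_content : String) (out : Bool) : Prop := out = tool_has_test_coverage_py_alt tool_name test_content
instance (tool_name : String) (test_content : String) (out : Bool) : Decidable (Spec_tool_has_test_coverage_py tool_name test_content out) := by unfold Spec_tool_has_test_coverage_py; infer_instance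

-- ===== CLAIM (what is proved, stated in full; the proofs are below) =====
def Claim_equal_tool_has_test_coverage_py : Prop := ∀ (tool_name : String) (test_content : String), Dom_tool_has_test_coverage_py tool_name test_content → Spec_tool_has_test_coverage_py tool_name test_content (tool_has_test_coverage_py tool_name test_content)

-- ===== LEMMAS AND PROOFS =====

-- an occurrence of pre ++ n ++ suf in cs is the same as an occurrence of n at some position i
-- whose left context ends with pre and whose right context starts with suf
lemma infix_iff_exists_at (pre n suf cs : List Char) :
    pre ++ n ++ suf <:+: cs ↔
      ∃ i, i + n.length ≤ cs.length ∧ (cs.drop i).take n.length = n ∧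
        pre <:+ cs.take i ∧ suf <+: cs.drop (i + n.length) := by
  constructor
  · rintro ⟨u, v, rfl⟩
    refine ⟨u.length + pre.length, ?_, ?_, ?_, ?_⟩
    · simp [List.length_append]; omega
    · have h : u ++ (pre ++ n ++ suf) ++ v = (u ++ pre) ++ (n ++ (suf ++ v)) := by
        simp [List.append_assoc]
      rw [h]
      rw [show u.length + pre.length = (u ++ pre).length by simp]
      rw [List.drop_left, List.take_left]
    · have h : u ++ (pre ++ n ++ suf) ++ v = (u ++ pre) ++ (n ++ (suf ++ v)) := by
        simp [List.append_assoc]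
      rw [h]
      rw [show u.length + pre.length = (u ++ pre).length by simp]
      rw [List.take_left]
      exact List.suffix_append u pre
    · have h : u ++ (pre ++ n ++ suf) ++ v = ((u ++ pre) ++ n) ++ (suf ++ v) := by
        simp [List.append_assoc]
      rw [h]
      rw [show u.length + pre.length + n.length = ((u ++ pre) ++ n).length by simp; omega]
      rw [List.drop_left]
      exact List.prefix_append suf v
  · rintro ⟨i, hb, h2, ⟨w, hw⟩, ⟨v, hv⟩⟩
    refine ⟨w, v, ?_⟩
    have hcs : cs = cs.take i ++ ((cs.drop i).take n.length ++ cs.drop (i + n.length)) := by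
      rw [show cs.drop (i + n.length) = (cs.drop i).drop n.length by rw [List.drop_drop, Nat.add_comm]]
      rw [List.take_append_drop, List.take_append_drop]
    calc w ++ (pre ++ n ++ suf) ++ v = (w ++ pre) ++ ((cs.drop i).take n.length ++ (suf ++ v)) := by
          rw [h2]; simp [List.append_assoc]
      _ = cs.take i ++ ((cs.drop i).take n.length ++ cs.drop (i + n.length)) := by rw [hw, hv]
      _ = cs := hcs.symm

-- B's scan hits exactly when one of A's six patterns occurs in test_content
lemma portB_iff (tn tc : String) :
    tool_has_test_coverage_py_alt tn tc = true ↔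
      ("test_".toList ++ tn.toList <:+: tc.toList) ∨ ("_".toList ++ tn.toList ++ "_".toList <:+: tc.toList) ∨
      (tn.toList ++ "_raw".toList <:+: tc.toList) ∨ ("\"".toList ++ tn.toList ++ "\"".toList <:+: tc.toList) ∨
      ("'".toList ++ tn.toList ++ "'".toList <:+: tc.toList) ∨ (tn.toList ++ "(".toList <:+: tc.toList) := by
  simp only [tool_has_test_coverage_py_alt, List.any_eq_true, List.mem_range]
  set n := tn.toList
  set cs := tc.toList
  constructor
  · rintro ⟨i, hi, hc⟩
    unfold altCheckAt at hc
    split at hc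
    case isFalse => simp at hc
    case isTrue hseg =>
      have hbnd : i + n.length ≤ cs.length := by omega
      simp only [Bool.or_eq_true, Bool.and_eq_true, PySem.Chars.endswith_iff,
        PySem.Chars.startswith_iff] at hc
      rcases hc with ((((h|⟨h1,h2⟩)|h)|⟨h1,h2⟩)|⟨h1,h2⟩)|h
      · exact Or.inl (by simpa using ((infix_iff_exists_at "test_".toList n [] cs).mpr ⟨i, hbnd, hseg, h, List.nil_prefix⟩))
      · exact Or.inr (Or.inl ((infix_iff_exists_at "_".toList n "_".toList cs).mpr
          ⟨i, hbnd, hseg, h1, h2⟩))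
      · exact Or.inr (Or.inr (Or.inl (by simpa using ((infix_iff_exists_at [] n "_raw".toList cs).mpr ⟨i, hbnd, hseg, List.nil_suffix, h⟩))))
      · exact Or.inr (Or.inr (Or.inr (Or.inl ((infix_iff_exists_at "\"".toList n "\"".toList cs).mpr
          ⟨i, hbnd, hseg, h1, h2⟩))))
      · exact Or.inr (Or.inr (Or.inr (Or.inr (Or.inl ((infix_iff_exists_at "'".toList n "'".toList cs).mpr
          ⟨i, hbnd, hseg, h1, h2⟩)))))
      · exact Or.inr (Or.inr (Or.inr (Or.inr (Or.inr (by simpa using ((infix_iff_exists_at [] n "(".toList cs).mpr ⟨i, hbnd, hseg, List.nil_suffix, h⟩))))))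
  · intro h
    have step : ∀ (i : Nat), i + n.length ≤ cs.length → altCheckAt n cs i = true →
        ∃ j, j < cs.length + 1 - n.length ∧ altCheckAt n cs j = true :=
      fun i hb hc => ⟨i, by omega, hc⟩
    rcases h with h|h|h|h|h|h
    · obtain ⟨i, hb, hseg, hpre, hsuf⟩ := (infix_iff_exists_at "test_".toList n [] cs).mp (by simpa using h)
      refine step i hb ?_
      unfold altCheckAt
      rw [if_pos hseg]
      simp only [Bool.or_eq_true, Bool.and_eq_true, PySem.Chars.endswith_iff, PySem.Chars.startswith_iff]
      tauto
    · obtain ⟨i, hb, hseg, hpre, hsuf⟩ := (infix_iff_exists_at "_".toList n "_".toList cs).mp h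
      refine step i hb ?_
      unfold altCheckAt
      rw [if_pos hseg]
      simp only [Bool.or_eq_true, Bool.and_eq_true, PySem.Chars.endswith_iff, PySem.Chars.startswith_iff]
      tauto
    · obtain ⟨i, hb, hseg, hpre, hsuf⟩ := (infix_iff_exists_at [] n "_raw".toList cs).mp (by simpa using h)
      refine step i hb ?_
      unfold altCheckAt
      rw [if_pos hseg]
      simp only [Bool.or_eq_true, Bool.and_eq_true, PySem.Chars.endswith_iff, PySem.Chars.startswith_iff]
      tauto
    · obtain ⟨i, hb, hseg, hpre, hsuf⟩ := (infix_iff_exists_at "\"".toList n "\"".toList cs).mp h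
      refine step i hb ?_
      unfold altCheckAt
      rw [if_pos hseg]
      simp only [Bool.or_eq_true, Bool.and_eq_true, PySem.Chars.endswith_iff, PySem.Chars.startswith_iff]
      tauto
    · obtain ⟨i, hb, hseg, hpre, hsuf⟩ := (infix_iff_exists_at "'".toList n "'".toList cs).mp h
      refine step i hb ?_
      unfold altCheckAt
      rw [if_pos hseg]
      simp only [Bool.or_eq_true, Bool.and_eq_true, PySem.Chars.endswith_iff, PySem.Chars.startswith_iff]
      tauto
    · obtain ⟨i, hb, hseg, hpre, hsuf⟩ := (infix_iff_exists_at [] n "(".toList cs).mp (by simpa using h)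
      refine step i hb ?_
      unfold altCheckAt
      rw [if_pos hseg]
      simp only [Bool.or_eq_true, Bool.and_eq_true, PySem.Chars.endswith_iff, PySem.Chars.startswith_iff]
      tauto

-- ===== VERDICT (by name: the statement is the Claim_ definition above) =====
theorem tool_has_test_coverage_py_spec : Claim_equal_tool_has_test_coverage_py := by
  intro tn tc _
  unfold Spec_tool_has_test_coverage_py
  rw [Bool.eq_iff_iff, portB_iff]
  simp only [tool_has_test_coverage_py, List.any_cons, List.any_nil, Bool.or_eq_true,
    Bool.or_false, PySem.Chars.isIn_iff_infix]
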